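-- pv_equiv track=rewrite | github.com/philius19/OrgaplexAnalyzer | src/core/nway_interaction.py | generate_boolean_combinations
-- ===== SOURCE A (Python) =====
-- import itertools
-- from typing import Dict, List, Set, Tuple, Optional
--
-- def generate_boolean_combinations(target_organelles: List[str]) -> List[Tuple[str, Set[str]]]:
--     """
--     Generate all 2^n boolean combinations for n target organelles.
--
--     Parameters:
--     -----------
--     target_organelles : List[str]
--         List of target organelle names
--
--     Returns:
--     --------
--     List[Tuple[str, Set[str]]] : List of (name, contact_set) tuples
--         - name: Human-readable name (e.g., "ER_only", "ER+LD")
--         - contact_set: Set of organelles that must be in contact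
--     """
--     # Sort alphabetically for consistent naming
--     sorted_targets = sorted(target_organelles)
--     combinations_list = []
--
--     # Generate all subsets from size 1 to n
--     for r in range(1, len(sorted_targets) + 1):
--         for combo in itertools.combinations(sorted_targets, r):
--             # Create name: "ER_only" for single, "ER+LD" for pairs
--             if r == 1:
--                 name = f"{combo[0]}_only"
--             else:
--                 name = "+".join(combo)
--
--             contact_set = set(combo)
--             combinations_list.append((name, contact_set))
--
--     # Add "No_contact" as final combination (empty set)
--     combinations_list.append(("No_contact", set()))
--
--     return combinations_list
-- ===== SOURCE B (Python) =====
-- def _step(x, groups):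
--     # prepend x into each size group, Pascal's-triangle style:
--     # new_groups[k] = [x]+each of groups[k-1], then groups[k]
--     nxt = [groups[0]]
--     prev = groups[0]
--     for h in groups[1:]:
--         nxt.append([[x] + s for s in prev] + h)
--         prev = h
--     nxt.append([[x] + s for s in prev])
--     return nxt
--
--
-- def generate_boolean_combinations(target_organelles):
--     sorted_targets = sorted(target_organelles)
--     # groups[k] = all k-element subsets of the suffix processed so far,
--     # in index-lexicographic order; built in one pass, no itertools.
--     groups = [[[]]]
--     for x in reversed(sorted_targets):
--         groups = _step(x, groups)
--     out = []
--     for group in groups[1:]: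
--         for combo in group:
--             name = combo[0] + "_only" if len(combo) == 1 else "+".join(combo)
--             out.append((name, set(combo)))
--     out.append(("No_contact", set()))
--     return out
-- ===== Notes on version B (the rewrite author's own statement) =====
-- stated objective: alternative
-- what changed: Replaces the per-size itertools.combinations enumeration with a Pascal's-triangle dynamic program: one pass over the sorted elements maintains a list of size-grouped subset lists (new group k = x prepended to old group k-1, then old group k), followed by a flatten-and-name pass.
import Mathlib
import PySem

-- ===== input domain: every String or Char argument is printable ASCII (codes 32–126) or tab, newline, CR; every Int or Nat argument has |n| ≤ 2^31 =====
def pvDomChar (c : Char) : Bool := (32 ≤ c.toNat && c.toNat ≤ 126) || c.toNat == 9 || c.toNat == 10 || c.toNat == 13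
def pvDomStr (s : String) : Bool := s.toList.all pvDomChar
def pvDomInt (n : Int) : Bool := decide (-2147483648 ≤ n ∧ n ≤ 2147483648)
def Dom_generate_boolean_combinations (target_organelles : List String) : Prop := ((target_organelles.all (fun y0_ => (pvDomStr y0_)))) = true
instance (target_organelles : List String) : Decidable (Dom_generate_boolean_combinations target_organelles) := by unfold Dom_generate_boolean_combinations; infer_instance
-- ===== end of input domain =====

-- B replaces the per-size itertools.combinations enumeration with a Pascal's-triangle
-- dynamic program over the sorted elements (objective: alternative, same cost).

-- ===== PORT A =====
def generate_boolean_combinations (target_organelles : List String) : List (String × List String) :=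
  let sorted_targets := PySem.List.sorted target_organelles (fun x => x) false
  let combinations_list :=
    (PySem.List.pyRange 1 ((sorted_targets.length : Int) + 1) 1).foldl
      (fun acc r =>
        (PySem.List.combinations sorted_targets r.toNat).foldl
          (fun acc combo =>
            acc ++ [(if r == 1 then PySem.List.pyGetD combo 0 "" ++ "_only"
                     else PySem.Str.join "+" combo,
                     PySem.Set.ofList combo)]) acc) []
  combinations_list ++ [("No_contact", PySem.Set.empty)]

-- ===== PORT B =====
-- _step's inner loop over groups[1:], carrying the previous group ('prev' in Source B)
def pvGo (x : String) (prev : List (List String)) : List (List (List String)) → List (List (List String))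
  | [] => [prev.map (fun s => x :: s)]
  | h :: t => (prev.map (fun s => x :: s) ++ h) :: pvGo x h t

def pvStep (x : String) : List (List (List String)) → List (List (List String))
  | [] => []
  | h :: t => h :: pvGo x h t

def generate_boolean_combinations_alt (target_organelles : List String) : List (String × List String) :=
  let sorted_targets := PySem.List.sorted target_organelles (fun x => x) false
  let groups := sorted_targets.reverse.foldl (fun g x => pvStep x g) [[[]]]
  let out :=
    (groups.drop 1).foldl
      (fun acc group =>
        group.foldl
          (fun acc combo =>
            acc ++ [(if combo.length == 1 then PySem.List.pyGetD combo 0 "" ++ "_only"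
                     else PySem.Str.join "+" combo,
                     PySem.Set.ofList combo)]) acc) []
  out ++ [("No_contact", PySem.Set.empty)]

-- ===== PRECONDITION & SPEC =====
def Spec_generate_boolean_combinations (target_organelles : List String) (out : List (String × List String)) : Prop := out = generate_boolean_combinations_alt target_organelles
instance (target_organelles : List String) (out : List (String × List String)) : Decidable (Spec_generate_boolean_combinations target_organelles out) := by unfold Spec_generate_boolean_combinations; infer_instance

-- ===== CLAIM =====
def Claim_equal_generate_boolean_combinations : Prop := ∀ (target_organelles : List String), Dom_generate_boolean_combinations target_organelles → Spec_generate_boolean_combinations target_organelles (generate_boolean_combinations target_organelles)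

-- ===== LEMMAS AND PROOFS =====

theorem pvGo_spec (x : String) (xs : List String) (m : Nat) :
    ∀ j, j + m = xs.length →
      pvGo x (PySem.List.combinations xs j)
        ((List.range' (j+1) m).map (fun k => PySem.List.combinations xs k))
      = (List.range' (j+1) (m+1)).map (fun k => PySem.List.combinations (x :: xs) k) := by
  induction m with
  | zero =>
    intro j hj
    simp only [List.range'_zero, List.map_nil, pvGo, Nat.zero_add, List.range'_one, List.map_cons]
    rw [PySem.List.combinations_cons_succ]
    have h0 : PySem.List.combinations xs (j+1) = [] :=
      PySem.List.combinations_eq_nil_of_length_lt xs (by omega)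
    rw [h0]
    simp
  | succ m ih =>
    intro j hj
    conv_lhs => rw [List.range'_succ, List.map_cons]
    show ((PySem.List.combinations xs j).map (fun s => x :: s)
          ++ PySem.List.combinations xs (j+1))
        :: pvGo x (PySem.List.combinations xs (j+1))
            ((List.range' (j+1+1) m).map (fun k => PySem.List.combinations xs k))
      = _
    rw [ih (j+1) (by omega)]
    conv_rhs => rw [List.range'_succ, List.map_cons]
    rw [PySem.List.combinations_cons_succ]

theorem pvStep_spec (x : String) (xs : List String) :
    pvStep x ((List.range (xs.length + 1)).map (fun k => PySem.List.combinations xs k))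
      = (List.range ((x :: xs).length + 1)).map (fun k => PySem.List.combinations (x :: xs) k) := by
  rw [List.range_eq_range', List.range'_succ, List.map_cons]
  show PySem.List.combinations xs 0
      :: pvGo x (PySem.List.combinations xs 0)
          ((List.range' 1 xs.length).map (fun k => PySem.List.combinations xs k))
    = _
  rw [pvGo_spec x xs xs.length 0 (by omega), List.length_cons, List.range_eq_range']
  conv_rhs => rw [List.range'_succ, List.map_cons]
  rw [PySem.List.combinations_zero, PySem.List.combinations_zero]

theorem pvGroups_spec (xs : List String) :
    xs.foldr pvStep [[[]]]
      = (List.range (xs.length + 1)).map (fun k => PySem.List.combinations xs k) := by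
  induction xs with
  | nil => simp [PySem.List.combinations_zero]
  | cons x xs ih =>
    rw [List.foldr_cons, ih, pvStep_spec]

theorem generate_boolean_combinations_eq (target_organelles : List String) :
    generate_boolean_combinations target_organelles
      = generate_boolean_combinations_alt target_organelles := by
  unfold generate_boolean_combinations generate_boolean_combinations_alt
  simp only []
  set st := PySem.List.sorted target_organelles (fun x => x) false with hst
  congr 1
  -- B's groups list
  have hgroups : st.reverse.foldl (fun g x => pvStep x g) [[[]]]
      = (List.range (st.length + 1)).map (fun k => PySem.List.combinations st k) := by
    rw [List.foldl_reverse]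
    exact pvGroups_spec st
  rw [hgroups]
  -- drop the k = 0 group
  have hdrop : ((List.range (st.length + 1)).map (fun k => PySem.List.combinations st k)).drop 1
      = (List.range' 1 st.length).map (fun k => PySem.List.combinations st k) := by
    rw [List.range_eq_range', List.range'_succ, List.map_cons, List.drop_one, List.tail_cons]
  rw [hdrop]
  -- both sides: inner append-singleton folds become maps, outer folds become flatMaps
  have hA : ∀ (acc : List (String × List String)),
      (PySem.List.pyRange 1 ((st.length : Int) + 1) 1).foldl
        (fun acc r =>
          (PySem.List.combinations st r.toNat).foldl
            (fun acc combo =>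
              acc ++ [(if r == 1 then PySem.List.pyGetD combo 0 "" ++ "_only"
                       else PySem.Str.join "+" combo,
                       PySem.Set.ofList combo)]) acc) acc
      = acc ++ (PySem.List.pyRange 1 ((st.length : Int) + 1) 1).flatMap
          (fun r => (PySem.List.combinations st r.toNat).map
            (fun combo => (if r == 1 then PySem.List.pyGetD combo 0 "" ++ "_only"
                           else PySem.Str.join "+" combo,
                           PySem.Set.ofList combo))) := by
    intro acc
    rw [← PySem.List.foldl_append_eq_flatMap]
    apply List.foldl_ext
    intro a r _
    rw [PySem.List.foldl_append_singleton_eq_map]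
  have hB : ∀ (acc : List (String × List String)),
      ((List.range' 1 st.length).map (fun k => PySem.List.combinations st k)).foldl
        (fun acc group =>
          group.foldl
            (fun acc combo =>
              acc ++ [(if combo.length == 1 then PySem.List.pyGetD combo 0 "" ++ "_only"
                       else PySem.Str.join "+" combo,
                       PySem.Set.ofList combo)]) acc) acc
      = acc ++ ((List.range' 1 st.length).map (fun k => PySem.List.combinations st k)).flatMap
          (fun group => group.map
            (fun combo => (if combo.length == 1 then PySem.List.pyGetD combo 0 "" ++ "_only"
                           else PySem.Str.join "+" combo,
                           PySem.Set.ofList combo))) := by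
    intro acc
    rw [← PySem.List.foldl_append_eq_flatMap]
    apply List.foldl_ext
    intro a g _
    rw [PySem.List.foldl_append_singleton_eq_map]
  rw [hA, hB]
  simp only [List.nil_append]
  -- reduce both flatMaps to flatMap over List.range st.length
  rw [PySem.List.pyRange_one, List.flatMap_map, List.range'_eq_map_range, List.flatMap_map,
      List.flatMap_map]
  have harg : ((st.length : Int) + 1 - 1).toNat = st.length := by omega
  rw [harg]
  apply List.flatMap_congr
  intro k _
  have hidx : ((1 : Int) + (k : Int)).toNat = 1 + k := by omega
  simp only [hidx]
  apply List.map_congr_left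
  intro c hc
  have hlen : c.length = 1 + k := PySem.List.length_of_mem_combinations hc
  cases k with
  | zero => simp [hlen]
  | succ k =>
    have h1 : ((1 : Int) + ((k : Int) + 1) == 1) = false := by
      simp; omega
    have h2 : (c.length == 1) = false := by simp [hlen]
    push_cast
    rw [h1, h2]

-- ===== VERDICT =====
theorem generate_boolean_combinations_spec : Claim_equal_generate_boolean_combinations := by
  intro t _
  exact generate_boolean_combinations_eq t
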